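-- pv_equiv track=rewrite | github.com/t-reppert/bitesofpy | 305/split_once.py | split_once
-- ===== SOURCE A (Python) =====
-- from typing import List
--
-- def split_once(text: str, separators: str = None) -> List[str]:
--     if not text:
--         return ['']
--     def check_text(text):
--         whitespace_seps = [' ', '\v', '\t', '\r', '\f', '\n']
--         for w in whitespace_seps:
--             if w in text:
--                 return True
--         return False
--     if not separators and not check_text(text):
--         return [text]
--     if not separators:
--         separators = [' ','\t','\v','\r', '\f', '\n']
--     try:
--         i = {text.index(s): s for s in separators if s in text}
--     except ValueError:
--         return text
--     separators_ordered = [i[k] for k in sorted(i.keys())]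
--     split_list = []
--     temp_string = text
--     for s in separators_ordered:
--         temp_list = temp_string.split(s, 1)
--         split_list.append(temp_list[0])
--         temp_string = temp_list[1]
--     split_list.append(temp_string)
--     return split_list
-- ===== SOURCE B (Python) =====
-- def split_once(text, separators=None):
--     if not text:
--         return ['']
--     if not separators:
--         if not any(w in text for w in ' \v\t\r\f\n'):
--             return [text]
--         separators = ' \t\v\r\f\n'
--     cuts = sorted({text.index(s) for s in separators if s in text})
--     parts = []
--     start = 0
--     for c in cuts:
--         parts.append(text[start:c])
--         start = c + 1
--     parts.append(text[start:])
--     return parts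
-- ===== Notes on version B (the rewrite author's own statement) =====
-- stated objective: alternative
-- what changed: B replaces A's dict-of-first-indices plus repeated split(s,1) on a shrinking remainder by a sorted set of cut indices and a single slicing pass over the original string.
import Mathlib
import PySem

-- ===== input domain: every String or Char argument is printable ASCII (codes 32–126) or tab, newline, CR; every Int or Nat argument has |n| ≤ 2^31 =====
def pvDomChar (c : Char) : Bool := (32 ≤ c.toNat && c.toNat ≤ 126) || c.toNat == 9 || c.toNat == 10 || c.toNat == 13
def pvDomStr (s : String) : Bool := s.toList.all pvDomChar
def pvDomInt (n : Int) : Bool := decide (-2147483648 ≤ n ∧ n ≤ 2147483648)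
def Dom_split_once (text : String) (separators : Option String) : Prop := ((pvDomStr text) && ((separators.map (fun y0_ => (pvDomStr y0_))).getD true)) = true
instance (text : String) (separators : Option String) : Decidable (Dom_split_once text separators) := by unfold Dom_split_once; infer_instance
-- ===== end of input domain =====

-- B computes the sorted set of first-occurrence cut indices and slices the original
-- string once, instead of A's repeated split(s,1) on a shrinking remainder (alternative decomposition).

-- ===== PORT A =====
-- check_text: the early-return membership loop over the whitespace list, as an or-fold
def pvCheckText (tl : List Char) : Bool :=
  [' ', '\x0B', '\t', '\r', '\x0C', '\n'].foldl (fun b w => b || PySem.Chars.isIn [w] tl) false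

-- the dict comprehension {text.index(s): s for s in separators if s in text}
-- (text.index(s) is guarded by 's in text', so it never raises; the 'except ValueError' arm is dead code)
def pvDictA (tl : List Char) (seps : List Char) : PySem.Dict Int Char :=
  (seps.filter (fun s => PySem.Chars.isIn [s] tl)).foldl
    (fun d s => d.insert (PySem.Chars.find tl [s]) s) PySem.Dict.empty

-- the for-loop: temp_list = temp_string.split(s, 1); append temp_list[0]; temp_string = temp_list[1]
-- (none = the IndexError of temp_list[1]; Python never reaches it here, see the proof)
def pvLoopA (seps : List Char) (acc : List (List Char)) (temp : List Char) : Option (List (List Char)) :=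
  match seps with
  | [] => some (acc ++ [temp])
  | s :: rest =>
    let tlst := PySem.Chars.splitOnMax temp [s] 1
    match PySem.List.pyGet? tlst 0, PySem.List.pyGet? tlst 1 with
    | some h, some t => pvLoopA rest (acc ++ [h]) t
    | _, _ => none

def split_once (text : String) (separators : Option String) : List String :=
  let tl := text.toList
  if tl = [] then [""]
  else
    let sepsFalsy := match separators with | none => true | some s => s.toList.isEmpty
    if sepsFalsy && !pvCheckText tl then [text]
    else
      let seps : List Char := match separators with
        | none => [' ', '\t', '\x0B', '\r', '\x0C', '\n']
        | some s => if s.toList.isEmpty then [' ', '\t', '\x0B', '\r', '\x0C', '\n'] else s.toList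
      let d := pvDictA tl seps
      let ks := PySem.List.sorted d.keys (fun k => k)
      let chars := ks.map (fun k => (d.get? k).getD ' ')   -- i[k] with k ∈ i.keys: lookup never fails
      match pvLoopA chars [] tl with
      | some parts => parts.map (fun cs => String.ofList cs)
      | none => []    -- IndexError branch, unreachable (proved below)

-- ===== PORT B =====
-- cuts = sorted({text.index(s) for s in separators if s in text})
def pvCutsB (tl : List Char) (seps : List Char) : List Int :=
  PySem.List.sorted
    (PySem.Set.ofList ((seps.filter (fun s => PySem.Chars.isIn [s] tl)).map
      (fun s => PySem.Chars.find tl [s])))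
    (fun k => k)

-- for c in cuts: parts.append(text[start:c]); start = c + 1 — then parts.append(text[start:])
def pvLoopB (tl : List Char) (cuts : List Int) (start : Int) (acc : List (List Char)) : List (List Char) :=
  match cuts with
  | [] => acc ++ [PySem.List.slice tl (some start) none]
  | c :: rest => pvLoopB tl rest (c + 1) (acc ++ [PySem.List.slice tl (some start) (some c)])

def split_once_alt (text : String) (separators : Option String) : List String :=
  let tl := text.toList
  if tl = [] then [""]
  else
    let sepsFalsy := match separators with | none => true | some s => s.toList.isEmpty
    if sepsFalsy && !(" \x0B\t\r\x0C\n".toList.any (fun w => PySem.Chars.isIn [w] tl)) then [text]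
    else
      let seps : List Char := match separators with
        | none => " \t\x0B\r\x0C\n".toList
        | some s => if s.toList.isEmpty then " \t\x0B\r\x0C\n".toList else s.toList
      (pvLoopB tl (pvCutsB tl seps) 0 []).map (fun cs => String.ofList cs)

-- ===== PRECONDITION & SPEC =====
def Spec_split_once (text : String) (separators : Option String) (out : List String) : Prop := out = split_once_alt text separators
instance (text : String) (separators : Option String) (out : List String) : Decidable (Spec_split_once text separators out) := by unfold Spec_split_once; infer_instance

-- ===== CLAIM (what is proved, stated in full; the proofs are below) =====
def Claim_equal_split_once : Prop := ∀ (text : String) (separators : Option String), Dom_split_once text separators → Spec_split_once text separators (split_once text separators)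

-- ===== LEMMAS AND PROOFS =====

-- `GoodP tl k c` : c occurs in tl and its FIRST occurrence is at index k
def GoodP (tl : List Char) (k : Int) (c : Char) : Prop :=
  ∃ pre suf, tl = pre ++ c :: suf ∧ c ∉ pre ∧ k = (pre.length : Int)

theorem findgo_first (c : Char) (pre suf : List Char) (k : Nat) (h : c ∉ pre) :
    PySem.Chars.find.go [c] (pre ++ c :: suf) k = (k : Int) + pre.length := by
  induction pre generalizing k with
  | nil => simp [PySem.Chars.find.go, List.isPrefixOf]
  | cons p pre ih =>
    simp only [List.mem_cons, not_or] at h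
    rw [List.cons_append, PySem.Chars.find.go]
    simp only [List.isPrefixOf, BEq.beq]
    rw [if_neg (by simp [h.1])]
    rw [ih (k+1) h.2]
    simp only [List.length_cons]
    push_cast
    ring

theorem find_first (c : Char) (pre suf : List Char) (h : c ∉ pre) :
    PySem.Chars.find (pre ++ c :: suf) [c] = (pre.length : Int) := by
  rw [PySem.Chars.find, findgo_first c pre suf 0 h]
  simp

theorem exists_first_split {c : Char} {l : List Char} (h : c ∈ l) :
    ∃ pre suf, l = pre ++ c :: suf ∧ c ∉ pre := by
  induction l with
  | nil => simp at h
  | cons x xs ih =>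
    by_cases hx : x = c
    · exact ⟨[], xs, by simp [hx], by simp⟩
    · have h2 : c ∈ xs := by
        rcases List.mem_cons.mp h with h1 | h1
        · exact absurd h1.symm hx
        · exact h1
      rcases ih h2 with ⟨pre, suf, hl, hp⟩
      refine ⟨x :: pre, suf, by simp [hl], ?_⟩
      simp only [List.mem_cons, not_or]
      exact ⟨fun hc => hx hc.symm, hp⟩

theorem isIn_singleton (c : Char) (l : List Char) : PySem.Chars.isIn [c] l = true ↔ c ∈ l := by
  rw [PySem.Chars.isIn_iff_infix]
  exact List.singleton_infix_iff c l

theorem splitgo_zero (c : Char) (fuel : Nat) (l cur : List Char) (acc : List (List Char)) :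
    PySem.Chars.splitOnMax.go [c] fuel 0 l cur acc = ((cur.reverse ++ l) :: acc).reverse := by
  cases fuel with
  | zero => rw [PySem.Chars.splitOnMax.go]
  | succ f => cases l with
    | nil => rw [PySem.Chars.splitOnMax.go]; simp; omega
    | cons x xs => rw [PySem.Chars.splitOnMax.go]; simp

theorem splitgo_one (c : Char) (suf : List Char) :
    ∀ (pre : List Char), c ∉ pre → ∀ (fuel : Nat), pre.length < fuel →
    ∀ (cur : List Char) (acc : List (List Char)),
    PySem.Chars.splitOnMax.go [c] fuel 1 (pre ++ c :: suf) cur acc =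
      (suf :: (cur.reverse ++ pre) :: acc).reverse := by
  intro pre
  induction pre with
  | nil =>
    intro _ fuel hf cur acc
    cases fuel with
    | zero => omega
    | succ f =>
      rw [List.nil_append, PySem.Chars.splitOnMax.go]
      simp only [List.isPrefixOf, BEq.rfl, Bool.and_eq_true, if_neg (by omega : ¬(1:Nat) = 0)]
      rw [if_pos (by simp)]
      rw [splitgo_zero]
      simp
  | cons p pre ih =>
    intro h fuel hf cur acc
    simp only [List.mem_cons, not_or] at h
    cases fuel with
    | zero => simp at hf
    | succ f =>
      rw [List.cons_append, PySem.Chars.splitOnMax.go]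
      rw [if_neg (by omega : ¬(1:Nat) = 0)]
      rw [if_neg (by simp; exact h.1)]
      rw [ih h.2 f (by simp at hf; omega) (p :: cur) acc]
      simp

theorem splitOnMax_first (c : Char) (pre suf : List Char) (h : c ∉ pre) :
    PySem.Chars.splitOnMax (pre ++ c :: suf) [c] 1 = [pre, suf] := by
  rw [PySem.Chars.splitOnMax]
  rw [if_neg (by omega)]
  simp only [Int.toNat_one]
  rw [splitgo_one c suf pre h _ (by simp) [] []]
  simp

theorem insert_invariant (tl : List Char) (d : PySem.Dict Int Char) (k : Int) (v : Char)
    (hd : ∀ p ∈ d.items, GoodP tl p.1 p.2) (hkv : GoodP tl k v) :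
    ∀ p ∈ (d.insert k v).items, GoodP tl p.1 p.2 := by
  intro p hp
  rw [PySem.Dict.insert] at hp
  by_cases hc : d.contains k
  · rw [if_pos hc] at hp
    simp only [List.mem_map] at hp
    rcases hp with ⟨q, hq, hpq⟩
    by_cases he : q.1 == k
    · rw [if_pos he] at hpq; rw [← hpq]; exact hkv
    · rw [if_neg he] at hpq; rw [← hpq]; exact hd q hq
  · rw [if_neg hc] at hp
    simp only [List.mem_append, List.mem_singleton] at hp
    rcases hp with hp | hp
    · exact hd p hp
    · rw [hp]; exact hkv

theorem dict_invariant (tl : List Char) (l : List Char) (d : PySem.Dict Int Char)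
    (hd : ∀ p ∈ d.items, GoodP tl p.1 p.2)
    (hl : ∀ s ∈ l, GoodP tl (PySem.Chars.find tl [s]) s) :
    ∀ p ∈ (l.foldl (fun d s => d.insert (PySem.Chars.find tl [s]) s) d).items, GoodP tl p.1 p.2 := by
  induction l generalizing d with
  | nil => exact hd
  | cons s l ih =>
    simp only [List.foldl_cons]
    exact ih _ (insert_invariant tl d _ s hd (hl s (by simp))) (fun x hx => hl x (by simp [hx]))

theorem get?_mem_items {κ ν : Type} [BEq κ] [LawfulBEq κ] (d : PySem.Dict κ ν) (k : κ) (v : ν)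
    (h : d.get? k = some v) : (k, v) ∈ d.items := by
  rw [PySem.Dict.get?] at h
  rcases Option.map_eq_some_iff.mp h with ⟨p, hp, hv⟩
  have hm := List.mem_of_find?_eq_some hp
  have hk := List.find?_some hp
  simp only [beq_iff_eq] at hk
  obtain ⟨pk, pv⟩ := p
  simp only at hk hv
  subst hk; subst hv
  exact hm

theorem get?_isSome_of_mem_keys {κ ν : Type} [BEq κ] [LawfulBEq κ] (d : PySem.Dict κ ν) (k : κ)
    (h : k ∈ d.keys) : ∃ v, d.get? k = some v := by
  rw [PySem.Dict.keys] at h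
  rcases List.mem_map.mp h with ⟨p, hp, hk⟩
  rw [PySem.Dict.get?]
  have : (List.find? (fun q => q.1 == k) d.items).isSome := by
    rw [List.find?_isSome]
    exact ⟨p, hp, by simp [hk]⟩
  rcases Option.isSome_iff_exists.mp this with ⟨q, hq⟩
  exact ⟨q.2, by rw [hq]; rfl⟩

theorem good_of_mem_filter (tl : List Char) (seps : List Char) :
    ∀ s ∈ seps.filter (fun s => PySem.Chars.isIn [s] tl), GoodP tl (PySem.Chars.find tl [s]) s := by
  intro s hs
  have hin : s ∈ tl := (isIn_singleton s tl).mp (by simpa using (List.mem_filter.mp hs).2)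
  rcases exists_first_split hin with ⟨pre, suf, hl, hp⟩
  refine ⟨pre, suf, hl, hp, ?_⟩
  rw [hl]
  exact find_first s pre suf hp

theorem checkText_eq (tl : List Char) :
    pvCheckText tl = (" \x0B\t\r\x0C\n".toList.any (fun w => PySem.Chars.isIn [w] tl)) := by
  simp [pvCheckText, show (" \x0B\t\r\x0C\n".toList) = [' ', '\x0B', '\t', '\r', '\x0C', '\n'] by decide,
    Bool.or_assoc]

theorem loopA_eq_loopB (tl : List Char) :
    ∀ (ps : List (Int × Char)) (j : Nat) (acc : List (List Char)),
    (∀ p ∈ ps, GoodP tl p.1 p.2) →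
    ((ps.map Prod.fst).Pairwise (· < ·)) →
    (∀ p ∈ ps, (j : Int) ≤ p.1) →
    j ≤ tl.length →
    pvLoopA (ps.map Prod.snd) acc (tl.drop j) = some (pvLoopB tl (ps.map Prod.fst) (j : Int) acc) := by
  intro ps
  induction ps with
  | nil =>
    intro j acc _ _ _ hj
    simp only [List.map_nil, pvLoopA, pvLoopB]
    rw [PySem.List.slice_from tl (by positivity)]
    simp
  | cons p rest ih =>
    intro j acc hgood hpw hge hj
    obtain ⟨k, c⟩ := p
    rcases hgood _ (List.mem_cons_self ..) with ⟨pre, suf, htl, hnp, hk0⟩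
    have hk : k = (pre.length : Int) := hk0
    have hjn : j ≤ pre.length := by
      have h1 : (j:Int) ≤ k := hge _ (List.mem_cons_self ..)
      rw [hk] at h1; exact_mod_cast h1
    have hdrop : tl.drop j = pre.drop j ++ c :: suf := by
      rw [htl, List.drop_append_of_le_length hjn]
    have hnp' : c ∉ pre.drop j := fun hm => hnp (List.drop_subset _ _ hm)
    have hsuf : tl.drop (pre.length + 1) = suf := by
      rw [htl, show pre ++ c :: suf = (pre ++ [c]) ++ suf by simp,
        List.drop_left' (by simp)]
    have hlen : pre.length + 1 ≤ tl.length := by rw [htl]; simp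
    have hslice : PySem.List.slice tl (some (j:Int)) (some k) = pre.drop j := by
      rw [hk, PySem.List.slice_natCast, hdrop, List.take_left' (by simp)]
    simp only [List.map_cons, pvLoopA, pvLoopB]
    rw [hdrop, splitOnMax_first c _ suf hnp']
    rw [← hsuf]
    simp only [show ∀ (a b : List Char), PySem.List.pyGet? [a, b] 0 = some a from fun a b => rfl,
               show ∀ (a b : List Char), PySem.List.pyGet? [a, b] 1 = some b from fun a b => rfl]
    rw [ih (pre.length + 1) (acc ++ [pre.drop j])
      (fun q hq => hgood q (List.mem_cons_of_mem _ hq))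
      ((List.pairwise_cons.mp hpw).2)
      (fun q hq => by
        have := (List.pairwise_cons.mp hpw).1 q.1 (List.mem_map.mpr ⟨q, hq, rfl⟩)
        rw [hk] at this; push_cast; omega)
      hlen]
    rw [hslice, hk]
    norm_num

theorem core_eq (tl seps : List Char) :
    pvLoopA ((PySem.List.sorted (pvDictA tl seps).keys (fun k => k)).map
      (fun k => ((pvDictA tl seps).get? k).getD ' ')) [] tl
    = some (pvLoopB tl (pvCutsB tl seps) 0 []) := by
  have hkeys : (pvDictA tl seps).keys
      = PySem.Set.ofList ((seps.filter (fun s => PySem.Chars.isIn [s] tl)).map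
          (fun s => PySem.Chars.find tl [s])) := by
    rw [pvDictA, PySem.Dict.keys_foldl_insert_key _ (fun s => PySem.Chars.find tl [s])
      (fun _ s => s) PySem.Dict.empty]
    rfl
  have hgoodd : ∀ p ∈ (pvDictA tl seps).items, GoodP tl p.1 p.2 := by
    rw [pvDictA]
    exact dict_invariant tl _ PySem.Dict.empty (by simp [PySem.Dict.empty]) (good_of_mem_filter tl seps)
  have hcuts : pvCutsB tl seps = PySem.List.sorted (pvDictA tl seps).keys (fun k => k) := by
    rw [pvCutsB, hkeys]
  have hgood : ∀ k ∈ PySem.List.sorted (pvDictA tl seps).keys (fun k => k),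
      GoodP tl k (((pvDictA tl seps).get? k).getD ' ') := by
    intro k hk
    have hk' : k ∈ (pvDictA tl seps).keys := by
      rw [PySem.List.mem_sorted] at hk; exact hk
    rcases get?_isSome_of_mem_keys _ k hk' with ⟨v, hv⟩
    rw [hv]
    exact hgoodd (k, v) (get?_mem_items _ k v hv)
  have hmain := loopA_eq_loopB tl
    ((PySem.List.sorted (pvDictA tl seps).keys (fun k => k)).map
      (fun k => (k, ((pvDictA tl seps).get? k).getD ' '))) 0 []
    (by
      intro p hp
      rcases List.mem_map.mp hp with ⟨k, hk, rfl⟩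
      exact hgood k hk)
    (by
      simp only [List.map_map, Function.comp_def, List.map_id']
      rw [hkeys]
      exact PySem.List.sorted_ofList_pairwise_lt _)
    (by
      intro p hp
      rcases List.mem_map.mp hp with ⟨k, hk, rfl⟩
      rcases hgood k hk with ⟨pre, suf, _, _, hkk⟩
      simp only [hkk]
      positivity)
    (Nat.zero_le _)
  simp only [List.map_map, Function.comp_def, List.map_id', List.drop_zero, Nat.cast_zero] at hmain
  rw [hmain, hcuts]

-- ===== VERDICT (by name: the statement is the Claim_ definition above) =====
theorem split_once_spec : Claim_equal_split_once := by
  intro text separators _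
  unfold Spec_split_once
  unfold split_once split_once_alt
  by_cases h0 : text.toList = []
  · simp [h0]
  · simp only [if_neg h0, checkText_eq]
    cases separators with
    | none =>
      by_cases hg : (" \x0B\t\r\x0C\n".toList.any (fun w => PySem.Chars.isIn [w] text.toList)) = true
      · rw [if_neg (by rw [hg]; simp), if_neg (by rw [hg]; simp)]
        rw [show (" \t\x0B\r\x0C\n".toList) = [' ', '\t', '\x0B', '\r', '\x0C', '\n'] by decide]
        rw [core_eq]
      · rw [if_pos (by rw [eq_false_of_ne_true hg]; simp), if_pos (by rw [eq_false_of_ne_true hg]; simp)]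
    | some s =>
      dsimp only
      by_cases he : s.toList.isEmpty = true
      · by_cases hg : (" \x0B\t\r\x0C\n".toList.any (fun w => PySem.Chars.isIn [w] text.toList)) = true
        · rw [show (" \t\x0B\r\x0C\n".toList) = [' ', '\t', '\x0B', '\r', '\x0C', '\n'] by decide]
          rw [if_pos he]
          rw [if_neg (by rw [hg]; simp), if_neg (by rw [hg]; simp)]
          rw [core_eq]
        · rw [if_pos (by rw [he, eq_false_of_ne_true hg]; simp), if_pos (by rw [he, eq_false_of_ne_true hg]; simp)]
      · rw [if_neg he, if_neg he]
        rw [if_neg (by rw [eq_false_of_ne_true he]; simp), if_neg (by rw [eq_false_of_ne_true he]; simp)]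
        rw [core_eq]
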